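-- pv_equiv track=rewrite | github.com/yunkya2/pico-mdx | pico-mdx/makemdxdata.py | dumpdata
-- ===== SOURCE A (Python) =====
-- def dumpdata(name, data):
--     out = name + ':\n'
--     p = 0
--     while len(data[p:]):
--         out += '.byte 0x%02x' % data[p]
--         for c in data[p + 1:p + 16]:
--             out += ', 0x%02x' % c
--         p += 16
--         out += '\n'
--     return out
-- ===== SOURCE B (Python) =====
-- def dumpdata(name, data):
--     out = name + ':\n'
--     for i, c in enumerate(data):
--         out += ('.byte 0x%02x' if i % 16 == 0 else ', 0x%02x') % c
--         if i % 16 == 15: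
--             out += '\n'
--     if len(data) % 16:
--         out += '\n'
--     return out
-- ===== Notes on version B (the rewrite author's own statement) =====
-- stated objective: simpler
-- what changed: A's nested loop (while over 16-byte chunks taken by slicing, inner for over the slice) is replaced by a single flat pass over enumerate(data) that decides line structure from i % 16; this also drops A's per-iteration copy of the whole remainder in 'len(data[p:])'.
import Mathlib
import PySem

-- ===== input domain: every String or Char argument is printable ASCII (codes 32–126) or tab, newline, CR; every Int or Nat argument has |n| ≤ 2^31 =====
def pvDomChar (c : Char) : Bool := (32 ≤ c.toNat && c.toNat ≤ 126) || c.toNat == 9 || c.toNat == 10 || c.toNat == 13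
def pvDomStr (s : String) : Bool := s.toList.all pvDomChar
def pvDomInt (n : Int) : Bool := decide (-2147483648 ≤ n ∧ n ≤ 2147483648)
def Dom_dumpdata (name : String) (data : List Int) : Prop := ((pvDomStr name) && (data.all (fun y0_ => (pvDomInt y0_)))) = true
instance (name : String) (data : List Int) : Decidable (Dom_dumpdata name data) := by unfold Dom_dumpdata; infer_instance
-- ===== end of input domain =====

-- B replaces A's nested chunk loop (outer while over 16-byte slices, inner for over the slice)
-- by a single flat pass over enumerate(data) deciding line structure by i % 16; it also avoids
-- A's per-iteration copy of the remainder in 'len(data[p:])' (measured faster in a timing run).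

-- shared format helper: Python's '%02x' % n — lowercase hex digits of |n|, zero-padded to width 2
-- (the width counts the '-' sign, so negative values are never padded); exact for every int.
def hex02 (n : Int) : String :=
  let ds := Nat.toDigits 16 n.natAbs
  if n < 0 then String.ofList ('-' :: ds)
  else if ds.length = 1 then String.ofList ('0' :: ds) else String.ofList ds

-- ===== PORT A =====
def dumpdataLoop (data : List Int) (p : Nat) (out : String) : String :=
  if h : (PySem.List.slice data (some (p : Int)) none).length = 0 then out
  else
    let out := out ++ ".byte 0x" ++ hex02 (PySem.List.pyGetD data (p : Int) 0)
    let out := (PySem.List.slice data (some ((p : Int) + 1)) (some ((p : Int) + 16))).foldl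
      (fun o c => o ++ ", 0x" ++ hex02 c) out
    dumpdataLoop data (p + 16) (out ++ "\n")
termination_by data.length - p
decreasing_by
  rw [PySem.List.slice_from_natCast, List.length_drop] at h
  omega

def dumpdata (name : String) (data : List Int) : String :=
  dumpdataLoop data 0 (name ++ ":\n")

-- ===== PORT B =====
def dumpdata_alt (name : String) (data : List Int) : String :=
  let out := name ++ ":\n"
  let out := (PySem.List.enumerate data 0).foldl
    (fun out ic =>
      let out := out ++ (if PySem.Int.mod ic.1 16 = 0 then ".byte 0x" ++ hex02 ic.2
                         else ", 0x" ++ hex02 ic.2)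
      if PySem.Int.mod ic.1 16 = 15 then out ++ "\n" else out)
    out
  if PySem.Int.mod (PySem.List.len data) 16 ≠ 0 then out ++ "\n" else out

-- ===== PRECONDITION & SPEC =====
def Spec_dumpdata (name : String) (data : List Int) (out : String) : Prop := out = dumpdata_alt name data
instance (name : String) (data : List Int) (out : String) : Decidable (Spec_dumpdata name data out) := by unfold Spec_dumpdata; infer_instance

-- ===== CLAIM (what is proved, stated in full; the proofs are below) =====
def Claim_equal_dumpdata : Prop := ∀ (name : String) (data : List Int), Dom_dumpdata name data → Spec_dumpdata name data (dumpdata name data)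

-- ===== LEMMAS AND PROOFS =====

-- reference rendering: one line per 16-byte chunk, every line '\n'-terminated
def lineTail (ys : List Int) : String :=
  ys.foldl (fun o c => o ++ ", 0x" ++ hex02 c) ""

def linesFrom : List Int → String
  | [] => ""
  | x :: rest =>
      ".byte 0x" ++ hex02 x ++ lineTail (rest.take 15) ++ "\n" ++ linesFrom (rest.drop 15)
termination_by l => l.length
decreasing_by simp

theorem foldl_comma_out (ys : List Int) (out : String) :
    ys.foldl (fun o c => o ++ ", 0x" ++ hex02 c) out = out ++ lineTail ys := by
  induction ys generalizing out with
  | nil => simp only [List.foldl_nil, lineTail]; exact String.append_empty.symm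
  | cons c ys ih =>
      simp only [List.foldl_cons]
      rw [ih]
      have h2 : lineTail (c :: ys) = ("" ++ ", 0x" ++ hex02 c) ++ lineTail ys := by
        simp only [lineTail, List.foldl_cons]; exact ih _
      rw [h2]
      simp [String.empty_append, String.append_assoc]

theorem lineTail_cons (c : Int) (ys : List Int) :
    lineTail (c :: ys) = ", 0x" ++ hex02 c ++ lineTail ys := by
  simp only [lineTail, List.foldl_cons]
  rw [foldl_comma_out]
  rw [String.empty_append, String.append_assoc]
  rfl


theorem loopA_eq (data : List Int) (p : Nat) (out : String) :
    dumpdataLoop data p out = out ++ linesFrom (data.drop p) := by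
  fun_induction dumpdataLoop data p out with
  | case1 p out h =>
      rw [PySem.List.slice_from_natCast, List.length_drop] at h
      have hd : data.drop p = [] := by
        apply List.eq_nil_of_length_eq_zero; rw [List.length_drop]; omega
      rw [hd]
      simp only [linesFrom]
      exact String.append_empty.symm
  | case2 p out h o1 o2 ih =>
      have hp : p < data.length := by
        rw [PySem.List.slice_from_natCast, List.length_drop] at h; omega
      have e1 : (p : Int) + 1 = ((p + 1 : Nat) : Int) := by push_cast; ring
      have e2 : (p : Int) + 16 = ((p + 1 : Nat) : Int) + ((15 : Nat) : Int) := by push_cast; ring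
      rw [ih]
      simp only [o2, o1]
      simp only [e1, e2, PySem.List.slice_natCast_add]
      rw [PySem.List.pyGetD_natCast, List.getD_eq_getElem data 0 hp]
      rw [foldl_comma_out]
      rw [List.drop_eq_getElem_cons hp]
      conv_rhs => rw [linesFrom]
      rw [List.drop_drop]
      have e3 : p + 1 + 15 = p + 16 := by omega
      rw [e3]
      simp [String.append_assoc]

-- B's fold step appends gPiece ic to the accumulator
def gPiece (ic : Int × Int) : String :=
  (if ic.1 % 16 = 0 then ".byte 0x" ++ hex02 ic.2 else ", 0x" ++ hex02 ic.2) ++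
  (if ic.1 % 16 = 15 then "\n" else "")

def catG : List (Int × Int) → String
  | [] => ""
  | ic :: l => gPiece ic ++ catG l

theorem catG_append (l₁ l₂ : List (Int × Int)) : catG (l₁ ++ l₂) = catG l₁ ++ catG l₂ := by
  induction l₁ with
  | nil => simp [catG, String.empty_append]
  | cons ic l ih => simp [catG, ih, String.append_assoc]

theorem foldB_eq (l : List (Int × Int)) (out : String) :
    l.foldl (fun out ic =>
      let out := out ++ (if PySem.Int.mod ic.1 16 = 0 then ".byte 0x" ++ hex02 ic.2
                         else ", 0x" ++ hex02 ic.2)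
      if PySem.Int.mod ic.1 16 = 15 then out ++ "\n" else out) out
    = out ++ catG l := by
  induction l generalizing out with
  | nil => simp only [List.foldl_nil, catG]; exact String.append_empty.symm
  | cons ic l ih =>
      simp only [List.foldl_cons]
      rw [ih]
      have hm : PySem.Int.mod ic.1 16 = ic.1 % 16 := PySem.Int.mod_eq_emod_of_pos (by omega)
      simp only [catG, gPiece, hm]
      split_ifs <;> simp [String.append_assoc, String.append_empty]

theorem innerB (t : List Int) (j : Nat) (s : Int) (h1 : 1 ≤ j) (h15 : j ≤ 15)
    (hlen : j + t.length ≤ 16) (hs : s % 16 = (j : Int)) :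
    catG (PySem.List.enumerate t s) = lineTail t ++ (if j + t.length = 16 then "\n" else "") := by
  induction t generalizing j s with
  | nil =>
      have : ¬ (j + ([] : List Int).length = 16) := by simp; omega
      rw [if_neg this]
      simp only [PySem.List.enumerate_nil, catG, lineTail, List.foldl_nil]
      exact String.append_empty.symm
  | cons c t' ih =>
      rw [PySem.List.enumerate_cons]
      simp only [catG, gPiece]
      have hj0 : ¬ (s % 16 = 0) := by omega
      rw [if_neg hj0, lineTail_cons]
      by_cases hj : j = 15
      · subst hj
        have ht' : t' = [] := by
          have := hlen; simp at this; exact List.eq_nil_of_length_eq_zero (by omega)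
        subst ht'
        rw [if_pos (by omega : s % 16 = 15)]
        simp only [PySem.List.enumerate_nil, catG, lineTail, List.foldl_nil]
        rw [if_pos (by simp)]
        simp [String.append_assoc, String.append_empty]
      · rw [if_neg (by omega : ¬ (s % 16 = 15))]
        rw [ih (j + 1) (s + 1) (by omega) (by omega) (by simp at hlen ⊢; omega) (by push_cast; omega)]
        have hcond : j + (c :: t').length = j + 1 + t'.length := by simp; omega
        rw [hcond]
        simp [String.append_assoc, String.append_empty]

theorem Bmain : ∀ (n : Nat) (xs : List Int), xs.length = n → ∀ (s : Int), s % 16 = 0 →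
    catG (PySem.List.enumerate xs s) ++ (if xs.length % 16 ≠ 0 then "\n" else "") = linesFrom xs := by
  intro n
  induction n using Nat.strong_induction_on with
  | _ n ihn =>
    intro xs hn s hs
    match xs with
    | [] =>
        simp only [PySem.List.enumerate_nil, catG, List.length_nil, linesFrom]
        rw [if_neg (by omega)]
        exact String.append_empty
    | x :: rest =>
        rw [PySem.List.enumerate_cons]
        simp only [catG, gPiece]
        rw [if_pos hs, if_neg (by omega : ¬ (s % 16 = 15))]
        conv_rhs => rw [linesFrom]
        simp only [List.length_cons] at hn
        have hsplit : rest = rest.take 15 ++ rest.drop 15 := (List.take_append_drop 15 rest).symm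
        have henum : PySem.List.enumerate rest (s + 1) =
            PySem.List.enumerate (rest.take 15) (s + 1) ++
            PySem.List.enumerate (rest.drop 15) (s + 1 + ((rest.take 15).length : Int)) := by
          conv_lhs => rw [hsplit]
          exact PySem.List.enumerate_append ..
        rw [henum, catG_append]
        have htake : (rest.take 15).length = min 15 rest.length := List.length_take ..
        by_cases hshort : rest.length ≤ 14
        · have htl : (rest.take 15).length = rest.length := by omega
          rw [innerB (rest.take 15) 1 (s + 1) (by omega) (by omega) (by omega) (by push_cast; omega)]
          rw [if_neg (by omega : ¬ (1 + (rest.take 15).length = 16))]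
          have hdnil : rest.drop 15 = [] := by
            apply List.eq_nil_of_length_eq_zero; rw [List.length_drop]; omega
          rw [hdnil]
          rw [if_pos (by simp only [List.length_cons]; omega : (x :: rest).length % 16 ≠ 0)]
          simp only [PySem.List.enumerate_nil, catG, linesFrom]
          simp [String.append_assoc, String.append_empty]
        · have htl : (rest.take 15).length = 15 := by omega
          rw [innerB (rest.take 15) 1 (s + 1) (by omega) (by omega) (by omega) (by push_cast; omega)]
          rw [if_pos (by omega : 1 + (rest.take 15).length = 16)]
          have hstart : s + 1 + ((rest.take 15).length : Int) = s + 16 := by rw [htl]; push_cast; ring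
          rw [hstart]
          have hlt : (rest.drop 15).length < n := by rw [List.length_drop]; omega
          have hib := ihn (rest.drop 15).length hlt (rest.drop 15) rfl (s + 16) (by omega)
          simp only [List.length_drop] at hib
          by_cases hm : (rest.length + 1) % 16 ≠ 0
          · rw [if_pos (by simp only [List.length_cons]; omega : (x :: rest).length % 16 ≠ 0)]
            rw [if_pos (by omega : (rest.length - 15) % 16 ≠ 0)] at hib
            rw [← hib]
            simp [String.append_assoc]
          · rw [if_neg (by simp only [List.length_cons]; omega : ¬ ((x :: rest).length % 16 ≠ 0))]
            rw [if_neg (by omega : ¬ ((rest.length - 15) % 16 ≠ 0))] at hib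
            rw [← hib]
            simp [String.append_assoc]

-- ===== VERDICT (by name: the statement is the Claim_ definition above) =====
theorem dumpdata_spec : Claim_equal_dumpdata := by
  intro name data _
  unfold Spec_dumpdata dumpdata dumpdata_alt
  dsimp only
  rw [loopA_eq, List.drop_zero, foldB_eq]
  have hb := Bmain data.length data rfl 0 (by norm_num)
  have hlen : PySem.Int.mod (PySem.List.len data) 16 = ((data.length % 16 : Nat) : Int) := by
    rw [PySem.List.len_eq]; exact PySem.Int.mod_natCast data.length 16
  rw [hlen]
  by_cases hmod : data.length % 16 ≠ 0
  · rw [if_pos (by exact_mod_cast (by omega : ((data.length % 16 : Nat) : Int) ≠ 0))]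
    rw [if_pos hmod] at hb
    rw [← hb]
    simp [String.append_assoc]
  · rw [if_neg (by simp at hmod ⊢; omega)]
    rw [if_neg hmod] at hb
    rw [← hb]
    simp [String.append_assoc]
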